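-- pv_equiv track=rewrite | github.com/carraya/tjhsstAI | wordladder/wordladder.py | degreeList
-- ===== SOURCE A (Python) =====
-- def degreeList(dic):
--     ls = [0]
--     for k in dic:
--         degree = len(dic[k])
--         if len(ls)-1<degree:
--             ls+=[0]*(degree-(len(ls))+1)
--         ls[degree]+=1
--     return ls
-- ===== SOURCE B (Python) =====
-- def degreeList(dic):
--     degs = [len(dic[k]) for k in dic]
--     if not degs:
--         return [0]
--     m = max(degs)
--     ls = [0] * (m + 1)
--     for d in degs:
--         ls[d] += 1
--     return ls
-- ===== Notes on version B (the rewrite author's own statement) =====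
-- stated objective: alternative
-- what changed: Replaces A's single pass that repeatedly grows the histogram list with a two-pass shape: compute all degrees, pre-allocate the final-size list from their maximum, then fill counts in a second pass.
import Mathlib
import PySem

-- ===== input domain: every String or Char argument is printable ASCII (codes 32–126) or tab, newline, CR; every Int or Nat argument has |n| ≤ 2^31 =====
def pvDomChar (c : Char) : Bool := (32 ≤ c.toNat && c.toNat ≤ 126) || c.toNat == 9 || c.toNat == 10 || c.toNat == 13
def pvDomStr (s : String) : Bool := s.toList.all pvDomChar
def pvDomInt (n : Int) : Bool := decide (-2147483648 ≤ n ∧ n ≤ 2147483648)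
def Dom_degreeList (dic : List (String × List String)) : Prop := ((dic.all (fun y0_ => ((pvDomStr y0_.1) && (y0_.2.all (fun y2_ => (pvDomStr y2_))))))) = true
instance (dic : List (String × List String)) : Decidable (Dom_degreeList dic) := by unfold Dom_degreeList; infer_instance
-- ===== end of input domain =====

-- B changes A's grow-as-you-go single pass into measure-then-fill (max degree, pre-allocated list, second pass); alternative decomposition, same cost.

-- ===== PORT A =====
-- dic[k]: first-match association-list lookup (Python dict lookup); the key comes from iterating dic itself, so it is always present.
def degreeList (dic : List (String × List String)) : List Int :=
  dic.foldl (fun ls kv =>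
    let degree := ((List.lookup kv.1 dic).getD []).length
    let ls := if ls.length - 1 < degree then ls ++ List.replicate (degree - ls.length + 1) (0 : Int) else ls
    ls.modify degree (· + 1)) [(0 : Int)]

-- ===== PORT B =====
def degreeList_alt (dic : List (String × List String)) : List Int :=
  let degs := dic.map (fun kv => ((List.lookup kv.1 dic).getD []).length)
  match degs with
  | [] => [(0 : Int)]
  | d :: ds =>
    let m := ds.foldl max d          -- max(degs) over the nonempty list
    (d :: ds).foldl (fun ls d => ls.modify d (· + 1)) (List.replicate (m + 1) (0 : Int))

-- ===== PRECONDITION & SPEC =====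
def Spec_degreeList (dic : List (String × List String)) (out : List Int) : Prop := out = degreeList_alt dic
instance (dic : List (String × List String)) (out : List Int) : Decidable (Spec_degreeList dic out) := by unfold Spec_degreeList; infer_instance

-- ===== CLAIM (what is proved, stated in full; the proofs are below) =====
def Claim_equal_degreeList : Prop := ∀ (dic : List (String × List String)), Dom_degreeList dic → Spec_degreeList dic (degreeList dic)

-- ===== LEMMAS AND PROOFS =====

-- histogram of a list of degrees, with n buckets
def pvHist (L : List Nat) (n : Nat) : List Int :=
  (List.range n).map (fun i => (L.count i : Int))

theorem pvHist_length (L : List Nat) (n : Nat) : (pvHist L n).length = n := by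
  simp [pvHist]

theorem pvHist_nil (n : Nat) : pvHist [] n = List.replicate n 0 := by
  simp [pvHist, List.map_const']

theorem pvHist_modify (L : List Nat) (n d : Nat) (_hd : d < n) :
    (pvHist L n).modify d (· + 1) = pvHist (L ++ [d]) n := by
  apply List.ext_getElem
  · simp [pvHist]
  · intro i h1 h2
    have hi : i < n := by simpa [pvHist] using h2
    rw [List.getElem_modify]
    by_cases hde : d = i
    · simp [pvHist, hde, List.count_append, List.count_singleton]
    · simp [pvHist, hde, List.count_append, List.count_singleton]

theorem pvHist_pad (L : List Nat) (n k : Nat) (h : ∀ x ∈ L, x < n) :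
    pvHist L (n + k) = pvHist L n ++ List.replicate k 0 := by
  induction k with
  | zero => simp
  | succ k ih =>
    have hc : L.count (n + k) = 0 := by
      rw [List.count_eq_zero]
      intro hm
      exact absurd (h _ hm) (by omega)
    have : pvHist L (n + (k + 1)) = pvHist L (n + k) ++ [(L.count (n + k) : Int)] := by
      simp [pvHist, ← Nat.add_assoc, List.range_succ]
    rw [this, ih, hc, List.append_assoc]
    simp [List.replicate_succ']

theorem pvInitLeFoldlMax (L : List Nat) (a : Nat) : a ≤ L.foldl max a := by
  induction L generalizing a with
  | nil => exact le_rfl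
  | cons y t ih => exact le_trans (le_max_left a y) (ih (max a y))

theorem pvLeFoldlMax (L : List Nat) (a x : Nat) (hx : x ∈ L) : x ≤ L.foldl max a := by
  induction L generalizing a with
  | nil => cases hx
  | cons y t ih =>
    rcases List.mem_cons.mp hx with h | h
    · subst h
      exact le_trans (le_max_right a x) (pvInitLeFoldlMax t (max a x))
    · exact ih (max a y) h

theorem pvFoldMax_lt (L : List Nat) : ∀ x ∈ L, x < L.foldl max 0 + 1 := by
  intro x hx
  have := pvLeFoldlMax L 0 x hx
  omega

-- A's loop step, on the degree only
def pvStepA (ls : List Int) (degree : Nat) : List Int :=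
  let ls := if ls.length - 1 < degree then ls ++ List.replicate (degree - ls.length + 1) (0 : Int) else ls
  ls.modify degree (· + 1)

theorem pvStepA_hist (p : List Nat) (d : Nat) :
    pvStepA (pvHist p (p.foldl max 0 + 1)) d = pvHist (p ++ [d]) ((p ++ [d]).foldl max 0 + 1) := by
  have hm : (p ++ [d]).foldl max 0 = max (p.foldl max 0) d := by
    rw [List.foldl_append]; rfl
  set m := p.foldl max 0 with hmdef
  have hlen : (pvHist p (m + 1)).length = m + 1 := pvHist_length _ _
  by_cases hc : m < d
  · have hmax : max m d = d := by omega
    have hpad : pvHist p (m + 1) ++ List.replicate (d - (m + 1) + 1) (0 : Int) = pvHist p (d + 1) := by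
      have h1 : d + 1 = (m + 1) + (d - (m + 1) + 1) := by omega
      rw [h1, pvHist_pad p (m + 1) _ ?_]
      intro x hx
      have := pvFoldMax_lt p x hx
      omega
    simp only [pvStepA, hlen]
    rw [if_pos (by omega), hpad, pvHist_modify _ _ _ (by omega), hm, hmax]
  · have hmax : max m d = m := by omega
    simp only [pvStepA, hlen]
    rw [if_neg (by omega), pvHist_modify _ _ _ (by omega), hm, hmax]

theorem pvLoopA (ds : List Nat) : ∀ p : List Nat,
    ds.foldl pvStepA (pvHist p (p.foldl max 0 + 1)) = pvHist (p ++ ds) ((p ++ ds).foldl max 0 + 1) := by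
  induction ds with
  | nil => intro p; simp
  | cons d ds ih =>
    intro p
    simp only [List.foldl_cons]
    rw [pvStepA_hist p d, ih (p ++ [d]), List.append_assoc]
    rfl

theorem pvLoopB (ds : List Nat) : ∀ p : List Nat, (∀ x ∈ ds, x < n) →
    ds.foldl (fun ls d => ls.modify d (· + 1)) (pvHist p n) = pvHist (p ++ ds) n := by
  induction ds with
  | nil => intro p _; simp
  | cons d ds ih =>
    intro p h
    simp only [List.foldl_cons]
    rw [pvHist_modify _ _ _ (h d (by simp)), ih (p ++ [d]) (fun x hx => h x (by simp [hx])),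
      List.append_assoc]
    rfl

theorem pvMain (degs : List Nat) :
    degs.foldl pvStepA [(0 : Int)] =
      (match degs with
       | [] => [(0 : Int)]
       | d :: ds => (d :: ds).foldl (fun ls d => ls.modify d (· + 1)) (List.replicate (ds.foldl max d + 1) (0 : Int))) := by
  cases degs with
  | nil => rfl
  | cons d ds =>
    have h0 : ([(0 : Int)]) = pvHist [] (([] : List Nat).foldl max 0 + 1) := by decide
    have hm : (d :: ds).foldl max 0 = ds.foldl max d := by simp [List.foldl_cons]
    have hlt : ∀ x ∈ d :: ds, x < ds.foldl max d + 1 := by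
      intro x hx
      have := pvFoldMax_lt (d :: ds) x hx
      omega
    show (d :: ds).foldl pvStepA [(0 : Int)] =
      (d :: ds).foldl (fun ls d => ls.modify d (· + 1)) (List.replicate (ds.foldl max d + 1) (0 : Int))
    rw [h0, pvLoopA (d :: ds) [], List.nil_append, hm,
      show List.replicate (ds.foldl max d + 1) (0 : Int) = pvHist [] (ds.foldl max d + 1) from (pvHist_nil _).symm,
      pvLoopB (n := ds.foldl max d + 1) (d :: ds) [] hlt, List.nil_append]

-- ===== VERDICT (by name: the statement is the Claim_ definition above) =====
theorem degreeList_spec : Claim_equal_degreeList := by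
  intro dic _
  have h := pvMain (dic.map fun kv => ((List.lookup kv.1 dic).getD []).length)
  rw [List.foldl_map] at h
  exact h
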